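-- pv_equiv track=rewrite | github.com/lpensler/lpensler-projects | proteinsynthesisfinalproject.py | RNA_complement
-- ===== SOURCE A (Python) =====
-- def verify_DNA(sequence): #this is where the DNA sequence is input from the path
--     for x in sequence:
--         if x != 'A' and x != 'T' and x != 'C' and  x!= 'G':
--             return False
--     return True
--
-- def RNA_complement(sequence): #this is where the DNA sequence is turned into the RNA Complement
--     if verify_DNA(sequence) == True:
--         acc = ''
--         i = 0
--         while i < len(sequence):
--             if sequence[i] =='A':
--                 acc += ('U')
--             if sequence[i] == 'T':
--                 acc += ('A')
--             if sequence[i] == 'C':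
--                 acc += ('G')
--             if sequence[i]== 'G':
--                 acc += ('C')
--             i+=1
--         return acc
-- ===== SOURCE B (Python) =====
-- _COMP = {'A': 'U', 'T': 'A', 'C': 'G', 'G': 'C'}
--
-- def RNA_complement(sequence):  # single fused validate-and-build pass
--     acc = ''
--     for c in sequence:
--         r = _COMP.get(c)
--         if r is None:
--             return None
--         acc += r
--     return acc
-- ===== Notes on version B (the rewrite author's own statement) =====
-- stated objective: simpler
-- what changed: Replaces A's two sequential scans (a verify pass, then an index-driven while loop with four independent if-appends) by one fused pass over the characters with a complement mapping, returning None at the first invalid character.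
import Mathlib
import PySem

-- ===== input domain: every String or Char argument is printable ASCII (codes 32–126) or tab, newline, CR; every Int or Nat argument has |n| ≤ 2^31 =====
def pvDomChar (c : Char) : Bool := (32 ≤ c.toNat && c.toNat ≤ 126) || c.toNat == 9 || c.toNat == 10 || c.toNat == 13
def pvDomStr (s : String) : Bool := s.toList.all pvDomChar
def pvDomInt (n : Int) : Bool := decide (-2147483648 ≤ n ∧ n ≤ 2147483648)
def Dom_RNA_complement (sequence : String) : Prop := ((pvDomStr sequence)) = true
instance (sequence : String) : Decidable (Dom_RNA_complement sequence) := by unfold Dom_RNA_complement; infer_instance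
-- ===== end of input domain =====

-- B fuses A's verify pass and build pass into one validate-and-build pass with a complement map (objective: simpler).

-- ===== PORT A =====
-- verify_DNA: scan, return False at the first character not in {A,T,C,G}
def verify_DNA (cs : List Char) : Bool :=
  match cs with
  | [] => true
  | x :: rest =>
      if x ≠ 'A' && x ≠ 'T' && x ≠ 'C' && x ≠ 'G' then false
      else verify_DNA rest

-- the while loop over i: sequential scan with four independent if-appends
def pvALoop (acc : List Char) (cs : List Char) : List Char :=
  match cs with
  | [] => acc
  | x :: rest =>
      let acc := if x = 'A' then acc ++ ['U'] else acc
      let acc := if x = 'T' then acc ++ ['A'] else acc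
      let acc := if x = 'C' then acc ++ ['G'] else acc
      let acc := if x = 'G' then acc ++ ['C'] else acc
      pvALoop acc rest

def RNA_complement (sequence : String) : Option String :=
  if verify_DNA sequence.toList = true then
    some (String.mk (pvALoop [] sequence.toList))
  else none   -- Python falls off the function: implicit None

-- ===== PORT B =====
-- _COMP.get(c)
def pvComp? (c : Char) : Option Char :=
  if c = 'A' then some 'U'
  else if c = 'T' then some 'A'
  else if c = 'C' then some 'G'
  else if c = 'G' then some 'C'
  else none

-- single fused pass: accumulate, bail out with none at the first unmapped character
def pvBLoop (acc : List Char) (cs : List Char) : Option (List Char) :=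
  match cs with
  | [] => some acc
  | c :: rest =>
      match pvComp? c with
      | none => none
      | some r => pvBLoop (acc ++ [r]) rest

def RNA_complement_alt (sequence : String) : Option String :=
  (pvBLoop [] sequence.toList).map String.mk

-- ===== PRECONDITION & SPEC =====
def Spec_RNA_complement (sequence : String) (out : Option String) : Prop := out = RNA_complement_alt sequence
instance (sequence : String) (out : Option String) : Decidable (Spec_RNA_complement sequence out) := by unfold Spec_RNA_complement; infer_instance

-- ===== CLAIM (what is proved, stated in full; the proofs are below) =====
def Claim_equal_RNA_complement : Prop := ∀ (sequence : String), Dom_RNA_complement sequence → Spec_RNA_complement sequence (RNA_complement sequence)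

-- ===== LEMMAS AND PROOFS =====
-- B's fused loop computes exactly "verify, then build" of A, for any accumulator.
theorem pvBLoop_eq (cs : List Char) : ∀ acc,
    pvBLoop acc cs = if verify_DNA cs then some (pvALoop acc cs) else none := by
  induction cs with
  | nil => intro acc; simp [pvBLoop, verify_DNA, pvALoop]
  | cons x rest ih =>
      intro acc
      by_cases hA : x = 'A'
      · simp [pvBLoop, verify_DNA, pvALoop, pvComp?, hA, ih]
      · by_cases hT : x = 'T'
        · simp [pvBLoop, verify_DNA, pvALoop, pvComp?, hA, hT, ih]
        · by_cases hC : x = 'C'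
          · simp [pvBLoop, verify_DNA, pvALoop, pvComp?, hA, hT, hC, ih]
          · by_cases hG : x = 'G'
            · simp [pvBLoop, verify_DNA, pvALoop, pvComp?, hA, hT, hC, hG, ih]
            · simp [pvBLoop, verify_DNA, pvALoop, pvComp?, hA, hT, hC, hG]

-- ===== VERDICT (by name: the statement is the Claim_ definition above) =====
theorem RNA_complement_spec : Claim_equal_RNA_complement := by
  intro s _
  unfold Spec_RNA_complement RNA_complement RNA_complement_alt
  rw [pvBLoop_eq]
  split_ifs with h <;> simp
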